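-- pv_equiv track=rewrite | github.com/harshraj211/wraith-scanner | scanner/integrations/nuclei_adapter.py | safe_command
-- ===== SOURCE A (Python) =====
-- from typing import Any, Dict, Iterable, List, Optional
--
-- def safe_command(command: List[str]) -> List[str]:
--     safe: List[str] = []
--     skip_next = False
--     for item in command:
--         if skip_next:
--             safe.append("<file>")
--             skip_next = False
--             continue
--         safe.append(item)
--         if item in {"-list"}:
--             skip_next = True
--     return safe
-- ===== SOURCE B (Python) =====
-- def safe_command(command):
--     # Search-and-slice: find each "-list" with .index, copy the prefix slice
--     # up to and including it, mask the following token, continue on the rest.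
--     out = []
--     rest = command
--     while "-list" in rest:
--         k = rest.index("-list")
--         out += rest[:k + 1]
--         if k + 1 < len(rest):
--             out.append("<file>")
--         rest = rest[k + 2:]
--     return out + rest
-- ===== Notes on version B (the rewrite author's own statement) =====
-- stated objective: alternative
-- what changed: Replaced the element-wise loop carrying a skip_next flag by a search-and-slice algorithm: repeatedly find the next '-list' with list.index, copy the whole prefix slice, append '<file>', and recurse on the remainder.
import Mathlib
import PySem

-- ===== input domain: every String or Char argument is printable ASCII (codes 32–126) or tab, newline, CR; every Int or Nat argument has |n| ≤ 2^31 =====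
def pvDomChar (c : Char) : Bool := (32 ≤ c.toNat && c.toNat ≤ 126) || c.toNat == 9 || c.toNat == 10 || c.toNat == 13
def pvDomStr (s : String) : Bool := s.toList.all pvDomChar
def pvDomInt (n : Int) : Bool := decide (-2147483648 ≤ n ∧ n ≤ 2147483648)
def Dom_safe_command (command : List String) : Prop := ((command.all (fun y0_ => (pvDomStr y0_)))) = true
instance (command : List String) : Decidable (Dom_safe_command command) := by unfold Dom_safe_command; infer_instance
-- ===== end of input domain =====

-- B replaces A's element-wise loop with a skip_next flag by a search-and-slice algorithm:
-- repeatedly find the next "-list" with list.index, copy the prefix slice up to and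
-- including it, mask the following token, and continue on the remainder (objective: alternative).

-- ===== PORT A =====
-- for-loop over items with state (safe, skip_next); literal transliteration of A
def safe_command (command : List String) : List String :=
  (command.foldl
    (fun (st : List String × Bool) item =>
      if st.2 then (st.1 ++ ["<file>"], false)
      else (st.1 ++ [item], item = "-list"))
    ([], false)).1

-- ===== PORT B =====
-- needed by the port's decreasing_by (cited there by name)
theorem pv_index?_lt_length {xs : List String} {v : String} {k : Nat}
    (h : PySem.List.index? xs v = some k) : k < xs.length := by
  obtain ⟨pre, suf, hxs, hlen, _⟩ := (PySem.List.index?_eq_some_iff _ _ _).1 h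
  subst hxs; simp [← hlen]

-- the search-and-slice loop of Source B: "-list" in rest / rest.index / slices rest[:k+1], rest[k+2:]
def safe_command_alt_go (out rest : List String) : List String :=
  match h : PySem.List.index? rest "-list" with
  | some k =>
      safe_command_alt_go
        (out ++ PySem.List.slice rest none (some ((k : Int) + 1)) ++
          (if (k : Int) + 1 < (rest.length : Int) then ["<file>"] else []))
        (PySem.List.slice rest (some ((k : Int) + 2)) none)
  | none => out ++ rest
termination_by rest.length
decreasing_by
  have hk := pv_index?_lt_length h
  have h2 : ((k : Int) + 2) = ((k + 2 : Nat) : Int) := by push_cast; ring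
  rw [h2, PySem.List.slice_from_natCast]
  simp only [List.length_drop]
  omega

def safe_command_alt (command : List String) : List String :=
  safe_command_alt_go [] command

-- ===== PRECONDITION & SPEC =====
def Spec_safe_command (command : List String) (out : List String) : Prop := out = safe_command_alt command
instance (command : List String) (out : List String) : Decidable (Spec_safe_command command out) := by unfold Spec_safe_command; infer_instance

-- ===== CLAIM (what is proved, stated in full; the proofs are below) =====
def Claim_equal_safe_command : Prop := ∀ (command : List String), Dom_safe_command command → Spec_safe_command command (safe_command command)

-- ===== LEMMAS AND PROOFS =====

-- common chunk-recursion characterisation of both loops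
def pvChunks : List String → List String
  | [] => []
  | x :: rest =>
    if x = "-list" then
      match rest with
      | [] => [x]
      | _ :: rest' => x :: "<file>" :: pvChunks rest'
    else x :: pvChunks rest

theorem pvChunks_cons_ne (x : String) (rest : List String) (hx : ¬ x = "-list") :
    pvChunks (x :: rest) = x :: pvChunks rest := by
  cases rest <;> simp [pvChunks, hx]

theorem pvChunks_append_no_list (l r : List String) (hl : "-list" ∉ l) :
    pvChunks (l ++ r) = l ++ pvChunks r := by
  induction l with
  | nil => simp
  | cons x t ih =>
    have hx : ¬ x = "-list" := by rintro rfl; exact hl (by simp)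
    rw [List.cons_append, pvChunks_cons_ne _ _ hx, ih (by intro hm; exact hl (by simp [hm]))]
    simp

theorem foldA_eq_chunks (l : List String) (acc : List String) :
    (l.foldl
      (fun (st : List String × Bool) item =>
        if st.2 then (st.1 ++ ["<file>"], false)
        else (st.1 ++ [item], item = "-list"))
      (acc, false)).1 = acc ++ pvChunks l := by
  fun_induction pvChunks l generalizing acc with
  | case1 => simp
  | case2 => simp [List.foldl]
  | case3 x rest' ih => simp [List.foldl, ih]
  | case4 x rest hx ih => simp [List.foldl, hx, ih]

theorem goB_eq_chunks (out rest : List String) :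
    safe_command_alt_go out rest = out ++ pvChunks rest := by
  fun_induction safe_command_alt_go out rest with
  | case1 out rest k h ih =>
    obtain ⟨pre, suf, hxs, hlen, hnm⟩ := (PySem.List.index?_eq_some_iff _ _ _).1 h
    subst hxs; subst hlen
    have h1 : ((pre.length : Int) + 1) = ((pre.length + 1 : Nat) : Int) := by push_cast; ring
    have h2 : ((pre.length : Int) + 2) = ((pre.length + 2 : Nat) : Int) := by push_cast; ring
    rw [h1, h2, PySem.List.slice_to_natCast, PySem.List.slice_from_natCast] at ih ⊢
    have htake : (pre ++ "-list" :: suf).take (pre.length + 1) = pre ++ ["-list"] := by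
      simp [List.take_append]
    have hdrop : (pre ++ "-list" :: suf).drop (pre.length + 2) = suf.drop 1 := by
      simp [List.drop_append]
    rw [htake, hdrop] at ih ⊢
    cases suf with
    | nil =>
      have hc : ¬ (((pre.length + 1 : Nat) : Int) < ((pre ++ ["-list"]).length : Int)) := by simp
      rw [dif_neg hc] at ih
      rw [if_neg hc, ih, pvChunks_append_no_list _ _ hnm]
      simp [pvChunks]
    | cons s suf' =>
      have hc : (((pre.length + 1 : Nat) : Int) < ((pre ++ "-list" :: s :: suf').length : Int)) := by
        simp
      rw [dif_pos hc] at ih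
      rw [if_pos hc, ih, pvChunks_append_no_list _ _ hnm]
      simp [pvChunks]
  | case2 out rest h =>
    have hnm : "-list" ∉ rest := (PySem.List.index?_eq_none_iff _ _).1 h
    have hid : pvChunks rest = rest := by
      simpa [pvChunks] using pvChunks_append_no_list rest [] hnm
    rw [hid]

-- ===== VERDICT (by name: the statement is the Claim_ definition above) =====
theorem safe_command_spec : Claim_equal_safe_command := by
  intro command _
  show safe_command command = safe_command_alt command
  rw [safe_command, safe_command_alt, foldA_eq_chunks, goB_eq_chunks]
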